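-- pv_equiv track=rewrite | github.com/sadhurshan/esai | ai_microservice/chat_router.py | _is_greeting_text
-- ===== SOURCE A (Python) =====
-- def _is_greeting_text(text: str) -> bool:
--     if not text:
--         return False
--     greetings = [
--         "hi",
--         "hello",
--         "hey",
--         "howdy",
--         "good morning",
--         "good afternoon",
--         "good evening",
--         "greetings",
--         "yo",
--     ]
--     return any(text == term or text.startswith(f"{term} ") for term in greetings)
-- ===== SOURCE B (Python) =====
-- _ONE_WORD = frozenset(["hi", "hello", "hey", "howdy", "greetings", "yo"])
-- _SECOND_WORD = frozenset(["morning", "afternoon", "evening"])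
--
--
-- def _is_greeting_text(text: str) -> bool:
--     first, _, rest = text.partition(" ")
--     if first in _ONE_WORD:
--         return True
--     if first != "good":
--         return False
--     second, _, _ = rest.partition(" ")
--     return second in _SECOND_WORD
-- ===== Notes on version B (the rewrite author's own statement) =====
-- stated objective: idiomatic
-- what changed: Instead of scanning the nine greetings and testing equality/startswith per term, B splits off the first (and, after 'good', the second) word once with str.partition and does set membership tests, so each term is no longer compared against the text individually.
import Mathlib
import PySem

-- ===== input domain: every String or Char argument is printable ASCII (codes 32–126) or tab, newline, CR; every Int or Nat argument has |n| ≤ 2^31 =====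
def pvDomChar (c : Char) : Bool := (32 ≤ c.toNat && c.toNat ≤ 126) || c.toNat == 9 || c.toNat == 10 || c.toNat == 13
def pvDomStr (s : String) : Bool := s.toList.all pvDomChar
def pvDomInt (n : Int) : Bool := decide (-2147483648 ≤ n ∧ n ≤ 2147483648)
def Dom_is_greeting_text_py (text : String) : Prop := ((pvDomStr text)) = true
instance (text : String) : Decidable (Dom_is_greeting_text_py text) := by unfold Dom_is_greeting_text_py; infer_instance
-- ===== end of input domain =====

-- B replaces A's per-term equality/startswith scan over the greeting list by splitting off the
-- first (and, after "good", the second) word once and testing set membership (idiomatic, one pass).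

-- ===== PORT A =====
def is_greeting_text_py (text : String) : Bool :=
  if text == "" then false
  else
    ([("hi" : String), "hello", "hey", "howdy", "good morning", "good afternoon",
      "good evening", "greetings", "yo"]).any
      (fun term => text == term || PySem.Str.startswith text (term ++ " "))

-- ===== PORT B =====
-- frozenset literals: membership equals membership in the list of their (distinct) elements
def pvOneWord : List (List Char) :=
  ["hi".toList, "hello".toList, "hey".toList, "howdy".toList, "greetings".toList, "yo".toList]
def pvSecondWord : List (List Char) :=
  ["morning".toList, "afternoon".toList, "evening".toList]
-- text.partition(" "): head = chars before the first ' ', tail = chars after it ("" if no ' ');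
-- exact for this single-character separator
def pvPartHead (l : List Char) : List Char := l.takeWhile (· ≠ ' ')
def pvPartTail (l : List Char) : List Char := (l.dropWhile (· ≠ ' ')).tail

def is_greeting_text_py_alt (text : String) : Bool :=
  let first := pvPartHead text.toList
  if pvOneWord.contains first then true
  else if first ≠ "good".toList then false
  else pvSecondWord.contains (pvPartHead (pvPartTail text.toList))

-- ===== PRECONDITION & SPEC =====
def Spec_is_greeting_text_py (text : String) (out : Bool) : Prop := out = is_greeting_text_py_alt text
instance (text : String) (out : Bool) : Decidable (Spec_is_greeting_text_py text out) := by unfold Spec_is_greeting_text_py; infer_instance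

-- ===== CLAIM (what is proved, stated in full; the proofs are below) =====
def Claim_equal_is_greeting_text_py : Prop := ∀ (text : String), Dom_is_greeting_text_py text → Spec_is_greeting_text_py text (is_greeting_text_py text)

-- ===== LEMMAS AND PROOFS =====

-- takeWhile over a word followed by a space
theorem pv_takeWhile_word (t r : List Char) (ht : ∀ a ∈ t, a ≠ ' ') :
    (t ++ ' ' :: r).takeWhile (· ≠ ' ') = t := by
  induction t with
  | nil => rw [List.nil_append, List.takeWhile_cons_of_neg (by simp)]
  | cons c t ih =>
    have hc : c ≠ ' ' := ht c (by simp)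
    rw [List.cons_append,
      List.takeWhile_cons_of_pos (p := fun x => decide (x ≠ ' ')) (by simp [hc]),
      ih (fun a ha => ht a (List.mem_cons_of_mem _ ha))]

theorem pv_dropWhile_word (t r : List Char) (ht : ∀ a ∈ t, a ≠ ' ') :
    (t ++ ' ' :: r).dropWhile (· ≠ ' ') = ' ' :: r := by
  induction t with
  | nil => rw [List.nil_append, List.dropWhile_cons_of_neg (by simp)]
  | cons c t ih =>
    have hc : c ≠ ' ' := ht c (by simp)
    rw [List.cons_append,
      List.dropWhile_cons_of_pos (p := fun x => decide (x ≠ ' ')) (by simp [hc]),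
      ih (fun a ha => ht a (List.mem_cons_of_mem _ ha))]

theorem pv_dropWhile_head {p : Char → Bool} {l : List Char} {c : Char} {r : List Char}
    (h : l.dropWhile p = c :: r) : p c = false := by
  induction l with
  | nil => simp [List.dropWhile] at h
  | cons a l ih =>
    by_cases hp : p a
    · exact ih (by simpa [List.dropWhile, hp] using h)
    · simp [List.dropWhile, hp] at h
      simpa [h.1] using hp

-- one-word greeting term: A's per-term test ↔ the first word equals the term
theorem pv_part1 (t l : List Char) (ht : ∀ a ∈ t, a ≠ ' ') :
    (l = t ∨ (t ++ [' ']) <+: l) ↔ pvPartHead l = t := by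
  unfold pvPartHead
  constructor
  · rintro (rfl | ⟨r, hr⟩)
    · exact List.takeWhile_eq_self_iff.mpr (by intro a ha; simpa using ht a ha)
    · have : l = t ++ ' ' :: r := by simpa using hr.symm
      rw [this]; exact pv_takeWhile_word t r ht
  · intro h
    have hl : l = t ++ l.dropWhile (· ≠ ' ') := by
      conv_lhs => rw [← List.takeWhile_append_dropWhile (p := (· ≠ ' ')) (l := l)]
      rw [h]
    rcases hd : l.dropWhile (· ≠ ' ') with _ | ⟨c, r⟩
    · left; rw [hl, hd, List.append_nil]
    · have hc : c = ' ' := by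
        have := pv_dropWhile_head hd
        simpa using this
      right
      refine ⟨r, ?_⟩
      rw [hl, hd, hc]; simp

-- two-word greeting term g ++ ' ' :: x: A's per-term test ↔ first word = g and second word = x
theorem pv_part2 (g x l : List Char) (hg : ∀ a ∈ g, a ≠ ' ') (hx : ∀ a ∈ x, a ≠ ' ')
    (hxne : x ≠ []) :
    (l = (g ++ ' ' :: x) ∨ ((g ++ ' ' :: x) ++ [' ']) <+: l) ↔
      (pvPartHead l = g ∧ pvPartHead (pvPartTail l) = x) := by
  constructor
  · rintro (rfl | ⟨r, hr⟩)
    · refine ⟨pv_takeWhile_word g x hg, ?_⟩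
      unfold pvPartTail pvPartHead
      rw [pv_dropWhile_word g x hg]
      show x.takeWhile (· ≠ ' ') = x
      exact List.takeWhile_eq_self_iff.mpr (by intro a ha; simpa using hx a ha)
    · have hl : l = g ++ ' ' :: (x ++ ' ' :: r) := by
        have := hr.symm
        simpa using this
      subst hl
      refine ⟨pv_takeWhile_word g _ hg, ?_⟩
      unfold pvPartTail pvPartHead
      rw [pv_dropWhile_word g _ hg]
      simpa using pv_takeWhile_word x r hx
  · rintro ⟨h1, h2⟩
    have hl : l = g ++ l.dropWhile (· ≠ ' ') := by
      conv_lhs => rw [← List.takeWhile_append_dropWhile (p := (· ≠ ' ')) (l := l)]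
      unfold pvPartHead at h1
      rw [h1]
    rcases hd : l.dropWhile (· ≠ ' ') with _ | ⟨c, r⟩
    · exfalso
      unfold pvPartTail pvPartHead at h2
      rw [hd] at h2
      simp at h2
      exact hxne h2
    · have hc : c = ' ' := by simpa using pv_dropWhile_head hd
      subst hc
      have htail : pvPartTail l = r := by unfold pvPartTail; rw [hd]; rfl
      rw [htail] at h2
      have hrd : r = x ++ r.dropWhile (· ≠ ' ') := by
        conv_lhs => rw [← List.takeWhile_append_dropWhile (p := (· ≠ ' ')) (l := r)]
        unfold pvPartHead at h2
        rw [h2]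
      rcases hd2 : r.dropWhile (· ≠ ' ') with _ | ⟨c', r'⟩
      · left
        rw [hl, hd, hrd, hd2, List.append_nil]
      · have hc' : c' = ' ' := by simpa using pv_dropWhile_head hd2
        subst hc'
        right
        refine ⟨r', ?_⟩
        rw [hl, hd, hrd, hd2]
        simp

-- the pointwise equality; the Dom hypothesis is not needed
theorem pv_main (text : String) : is_greeting_text_py text = is_greeting_text_py_alt text := by
  unfold is_greeting_text_py is_greeting_text_py_alt pvOneWord pvSecondWord
  rw [Bool.eq_iff_iff]
  by_cases h0 : text = ""
  · subst h0
    simp [pvPartHead]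
  · have h0' : (text == "") = false := by simpa using h0
    simp only [h0', Bool.false_eq_true, if_false, List.any_cons, List.any_nil,
      Bool.or_eq_true, beq_iff_eq, PySem.Str.startswith_eq, PySem.Chars.startswith_iff,
      List.contains_eq_mem, List.mem_cons, List.not_mem_nil, or_false, decide_eq_true_eq]
    have heq : ∀ t : String, text = t ↔ text.toList = t.toList := fun t => String.ext_iff
    have hpre : ∀ t : String, ((t ++ " ").toList <+: text.toList) ↔ ((t.toList ++ [' ']) <+: text.toList) := by
      intro t; rw [show (t ++ " ").toList = t.toList ++ [' '] by simp
]
    have T1 : ∀ t : String, (∀ a ∈ t.toList, a ≠ ' ') →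
        ((text = t ∨ (t ++ " ").toList <+: text.toList) ↔ pvPartHead text.toList = t.toList) := by
      intro t ht
      rw [heq t, hpre t]
      exact pv_part1 t.toList text.toList ht
    have T2 : ∀ (g x t : String), t.toList = g.toList ++ ' ' :: x.toList →
        (∀ a ∈ g.toList, a ≠ ' ') → (∀ a ∈ x.toList, a ≠ ' ') → x.toList ≠ [] →
        ((text = t ∨ (t ++ " ").toList <+: text.toList) ↔
          (pvPartHead text.toList = g.toList ∧ pvPartHead (pvPartTail text.toList) = x.toList)) := by
      intro g x t hsplit hg hx hxne
      rw [heq t, hpre t, hsplit]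
      exact pv_part2 g.toList x.toList text.toList hg hx hxne
    rw [T1 "hi" (by simp), T1 "hello" (by simp), T1 "hey" (by simp),
        T1 "howdy" (by simp), T1 "greetings" (by simp), T1 "yo" (by simp),
        T2 "good" "morning" "good morning" (by simp) (by simp) (by simp) (by simp),
        T2 "good" "afternoon" "good afternoon" (by simp) (by simp) (by simp) (by simp),
        T2 "good" "evening" "good evening" (by simp) (by simp) (by simp) (by simp)]
    clear heq hpre T1 T2 h0' h0
    split_ifs with h1 h2
    · simp only [iff_true]
      tauto
    · simp only [iff_false, not_or]
      push Not at h1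
      refine ⟨h1.1, h1.2.1, h1.2.2.1, h1.2.2.2.1, ?_, ?_, ?_, h1.2.2.2.2.1, h1.2.2.2.2.2⟩ <;>
        exact fun h => h2 h.1
    · push Not at h2
      simp [h2]

-- ===== VERDICT (by name: the statement is the Claim_ definition above) =====
theorem is_greeting_text_py_spec : Claim_equal_is_greeting_text_py := by
  intro text _
  unfold Spec_is_greeting_text_py
  exact pv_main text
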